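-- pv_equiv track=rewrite | github.com/victorvanleuven/De-3-Code-Koningen | main.py | count_overlap
-- ===== SOURCE A (Python) =====
-- def count_overlap(connection_path_dict):
--     checked_lines = []
--     lines = []
--     overlap = 0
--     used_points = connection_path_dict.values()
--
--     for list in used_points:
--         for index in range(len(list) - 1):
--             a = list[index]
--             b = list[index + 1]
--             line = {a, b}
--             lines.append(line)
--
--     for line in lines:
--         if line in checked_lines:
--             overlap += 1
--         else:
--             checked_lines.append(line)
--
--     return overlap
-- ===== SOURCE B (Python) =====
-- def count_overlap(connection_path_dict):
--     segs = []
--     for path in connection_path_dict.values():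
--         for a, b in zip(path, path[1:]):
--             segs.append((a, b) if a <= b else (b, a))
--     segs.sort()
--     overlap = 0
--     for prev, cur in zip(segs, segs[1:]):
--         if prev == cur:
--             overlap += 1
--     return overlap
-- ===== Notes on version B (the rewrite author's own statement) =====
-- stated objective: faster
-- what changed: A deduplicates segment sets with a linear membership scan over a growing checked list (quadratic); B canonicalises each segment to a sorted pair, sorts the whole segment list once, and counts equal adjacent entries in a single pass.
import Mathlib
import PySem

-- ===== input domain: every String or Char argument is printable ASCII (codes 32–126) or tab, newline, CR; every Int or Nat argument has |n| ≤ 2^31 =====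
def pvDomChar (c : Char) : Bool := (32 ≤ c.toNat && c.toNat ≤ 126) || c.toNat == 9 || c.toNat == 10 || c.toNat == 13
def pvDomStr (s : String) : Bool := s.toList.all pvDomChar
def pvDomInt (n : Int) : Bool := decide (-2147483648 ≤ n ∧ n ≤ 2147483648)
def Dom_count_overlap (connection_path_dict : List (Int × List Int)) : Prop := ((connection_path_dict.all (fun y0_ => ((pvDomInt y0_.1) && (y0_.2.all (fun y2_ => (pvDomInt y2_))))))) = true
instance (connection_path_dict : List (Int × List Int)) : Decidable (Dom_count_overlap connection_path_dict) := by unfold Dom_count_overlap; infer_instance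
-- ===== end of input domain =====

-- B replaces A's quadratic list-membership de-duplication of segment sets by canonicalising each
-- segment to a sorted pair, sorting the segment list once, and counting equal adjacent entries.

-- ===== PORT A =====
-- 'line in checked_lines' is Python list membership by ==, i.e. set equality: ported as .any with PySem.Set.equal (exact)
def count_overlap (connection_path_dict : List (Int × List Int)) : Int :=
  (((PySem.Dict.ofList connection_path_dict).values.foldl (fun lines l =>
      (PySem.List.pyRange 0 ((l.length : Int) - 1) 1).foldl (fun lines index =>
        lines ++ [PySem.Set.ofList [PySem.List.pyGetD l index 0,
                                    PySem.List.pyGetD l (index + 1) 0]]) lines) [])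
    |>.foldl (fun (st : List (PySem.Set Int) × Int) line =>
      if st.1.any (fun s => PySem.Set.equal s line) then (st.1, st.2 + 1)
      else (st.1 ++ [line], st.2)) ([], 0)).2

-- ===== PORT B =====
-- segs.sort() on int pairs is Python's lexicographic tuple sort: PySem.List.sorted2 with the two components
def count_overlap_alt (connection_path_dict : List (Int × List Int)) : Int :=
  let segs := (PySem.Dict.ofList connection_path_dict).values.foldl (fun segs path =>
      (path.zip (path.drop 1)).foldl (fun (segs : List (Int × Int)) p =>
        segs ++ [if p.1 ≤ p.2 then (p.1, p.2) else (p.2, p.1)]) segs) []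
  let segs := PySem.List.sorted2 segs (·.1) (·.2)
  (segs.zip (segs.drop 1)).foldl (fun ov q => if q.1 = q.2 then ov + 1 else ov) 0

-- ===== PRECONDITION & SPEC =====
def Spec_count_overlap (connection_path_dict : List (Int × List Int)) (out : Int) : Prop := out = count_overlap_alt connection_path_dict
instance (connection_path_dict : List (Int × List Int)) (out : Int) : Decidable (Spec_count_overlap connection_path_dict out) := by unfold Spec_count_overlap; infer_instance

-- ===== CLAIM (what is proved, stated in full; the proofs are below) =====
def Claim_equal_count_overlap : Prop := ∀ (connection_path_dict : List (Int × List Int)), Dom_count_overlap connection_path_dict → Spec_count_overlap connection_path_dict (count_overlap connection_path_dict)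

-- ===== LEMMAS AND PROOFS =====

-- canonical key of a segment (B's sorted pair), and the set A builds for a pair
def pvCanon (p : Int × Int) : Int × Int := if p.1 ≤ p.2 then (p.1, p.2) else (p.2, p.1)
def pvMkSet (p : Int × Int) : PySem.Set Int := PySem.Set.ofList [p.1, p.2]

-- the lexicographic 'before' test sorted2 uses on int pairs
def pvLtb (a b : Int × Int) : Bool := decide (a.1 < b.1) || (!decide (b.1 < a.1) && decide (a.2 < b.2))

-- A's set {a,b} equality is equality of canonical pairs
theorem pv_set_equal_canon (p q : Int × Int) :
    PySem.Set.equal (pvMkSet p) (pvMkSet q) = decide (pvCanon p = pvCanon q) := by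
  rcases p with ⟨a, b⟩; rcases q with ⟨c, d⟩
  unfold pvMkSet
  by_cases h : pvCanon (a, b) = pvCanon (c, d)
  · simp only [h, decide_true]
    rw [PySem.Set.equal_iff]
    intro x
    simp only [PySem.Set.mem_ofList, List.mem_cons, List.not_mem_nil, or_false]
    unfold pvCanon at h
    split_ifs at h <;> simp only [Prod.mk.injEq] at h <;> obtain ⟨h5, h6⟩ := h <;>
      subst h5 <;> subst h6 <;> constructor <;> intro hx <;> omega
  · simp only [h, decide_false]
    rw [Bool.eq_false_iff, Ne, PySem.Set.equal_iff]
    intro hall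
    apply h
    clear h
    have h1 := hall a; have h2 := hall b; have h3 := hall c; have h4 := hall d
    simp only [PySem.Set.mem_ofList, List.mem_cons, List.not_mem_nil, or_false] at h1 h2 h3 h4
    unfold pvCanon
    simp only [true_or, or_true, iff_true, true_iff] at h1 h2 h3 h4
    split_ifs <;> simp only [Prod.mk.injEq] <;>
      rcases h1 with h1 | h1 <;> rcases h2 with h2 | h2 <;>
      rcases h3 with h3 | h3 <;> rcases h4 with h4 | h4 <;> omega

-- the index loop of A enumerates exactly the consecutive pairs
theorem pv_range_pairs (l : List Int) :
    (PySem.List.pyRange 0 ((l.length : Int) - 1) 1).map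
        (fun i => (PySem.List.pyGetD l i 0, PySem.List.pyGetD l (i + 1) 0))
      = l.zip (l.drop 1) := by
  rw [PySem.List.pyRange_one]
  rw [List.map_map]
  apply List.ext_getElem
  · simp [List.length_zip]
  · intro i h1 h2
    simp only [List.length_map, List.length_range] at h1
    have hi : i + 1 < l.length := by omega
    have hi0 : i < l.length := by omega
    simp only [List.getElem_map, List.getElem_range, Function.comp_apply]
    have e1 : (0 : Int) + (i : Int) = ((i : Nat) : Int) := by omega
    rw [e1]
    have e2 : ((i : Nat) : Int) + 1 = (((i + 1 : Nat)) : Int) := by push_cast; omega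
    rw [e2, PySem.List.pyGetD_natCast, PySem.List.pyGetD_natCast]
    rw [List.getElem_zip]
    simp [hi0, hi]

-- A's lines list is the segment pairs mapped to sets
theorem pv_lines_eq (vs : List (List Int)) (acc : List (PySem.Set Int)) :
    vs.foldl (fun lines l =>
      (PySem.List.pyRange 0 ((l.length : Int) - 1) 1).foldl (fun lines index =>
        lines ++ [PySem.Set.ofList [PySem.List.pyGetD l index 0, PySem.List.pyGetD l (index + 1) 0]]) lines) acc
    = acc ++ (vs.flatMap (fun l => l.zip (l.drop 1))).map pvMkSet := by
  induction vs generalizing acc with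
  | nil => simp
  | cons l t ih =>
    simp only [List.foldl_cons, List.flatMap_cons, List.map_append]
    rw [show (fun lines index =>
        lines ++ [PySem.Set.ofList [PySem.List.pyGetD l index 0, PySem.List.pyGetD l (index + 1) 0]])
      = (fun lines index => lines ++ [pvMkSet (PySem.List.pyGetD l index 0, PySem.List.pyGetD l (index + 1) 0)]) from rfl]
    rw [PySem.List.foldl_append_singleton_eq_map]
    rw [ih]
    rw [← pv_range_pairs l, List.map_map]
    simp [List.append_assoc]

-- A's de-duplication scan counted through canonical keys
theorem pv_scan_eq (ps cs : List (Int × Int)) (ov : Int) :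
    ((ps.map pvMkSet).foldl (fun (st : List (PySem.Set Int) × Int) line =>
      if st.1.any (fun s => PySem.Set.equal s line) then (st.1, st.2 + 1)
      else (st.1 ++ [line], st.2)) (cs.map pvMkSet, ov)).2
    = ov + ps.length + cs.length
        - (PySem.Set.update (cs.map pvCanon) (ps.map pvCanon)).length := by
  induction ps generalizing cs ov with
  | nil => simp [PySem.Set.update_nil]
  | cons p t ih =>
    simp only [List.map_cons, List.foldl_cons, PySem.Set.update_cons]
    have hm : (cs.map pvMkSet).any (fun s => PySem.Set.equal s (pvMkSet p))
        = decide (pvCanon p ∈ cs.map pvCanon) := by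
      simp only [List.any_map, Function.comp_def, pv_set_equal_canon]
      by_cases hc : pvCanon p ∈ cs.map pvCanon
      · simp only [hc, decide_true]
        rw [List.any_eq_true]
        obtain ⟨c, hcmem, hce⟩ := List.mem_map.mp hc
        exact ⟨c, hcmem, by simp [hce]⟩
      · simp only [hc, decide_false]
        rw [List.any_eq_false]
        intro c hcmem
        simp only [decide_eq_true_eq]
        intro hce
        exact hc (List.mem_map.mpr ⟨c, hcmem, hce⟩)
    by_cases hmem : pvCanon p ∈ cs.map pvCanon
    · rw [hm]
      simp only [hmem, decide_true, if_true]
      rw [ih cs (ov + 1)]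
      rw [PySem.Set.add_of_mem hmem]
      simp only [List.length_cons]
      push_cast; omega
    · rw [hm]
      simp only [hmem, decide_false, Bool.false_eq_true, if_false]
      have : cs.map pvMkSet ++ [pvMkSet p] = (cs ++ [p]).map pvMkSet := by simp
      rw [this, ih (cs ++ [p]) ov]
      rw [PySem.Set.add_of_not_mem hmem]
      have : (cs ++ [p]).map pvCanon = cs.map pvCanon ++ [pvCanon p] := by simp
      rw [this]
      simp only [List.length_append, List.length_cons, List.length_nil]
      push_cast; omega

-- the A-side value in closed form
theorem pv_A_closed (d : List (Int × List Int)) :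
    count_overlap d =
      (((PySem.Dict.ofList d).values.flatMap (fun l => l.zip (l.drop 1))).length : Int)
        - (PySem.Set.ofList
            (((PySem.Dict.ofList d).values.flatMap (fun l => l.zip (l.drop 1))).map pvCanon)).length := by
  unfold count_overlap
  rw [pv_lines_eq]
  have h := pv_scan_eq ((PySem.Dict.ofList d).values.flatMap (fun l => l.zip (l.drop 1))) [] 0
  simp only [List.map_nil, List.nil_append, List.length_nil] at h ⊢
  rw [h]
  rw [PySem.Set.update_nil_left]
  push_cast; ring

-- the lexicographic test as a proposition, and its order facts
theorem pv_ltb_iff (a b : Int × Int) :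
    pvLtb a b = true ↔ (a.1 < b.1 ∨ (¬ b.1 < a.1 ∧ a.2 < b.2)) := by
  simp [pvLtb]

theorem pv_ltb_asymm {a b : Int × Int} (h : pvLtb a b = true) : pvLtb b a = false := by
  rw [Bool.eq_false_iff, Ne, pv_ltb_iff]
  rw [pv_ltb_iff] at h
  omega

theorem pv_ltb_antisymm {a b : Int × Int} (h1 : pvLtb a b = false) (h2 : pvLtb b a = false) : a = b := by
  rw [Bool.eq_false_iff, Ne, pv_ltb_iff] at h1 h2
  rcases a with ⟨a1, a2⟩; rcases b with ⟨b1, b2⟩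
  simp only [Prod.mk.injEq]
  simp only at h1 h2
  omega

theorem pv_ltb_shift {x y z : Int × Int} (h1 : pvLtb x y = true) (h2 : pvLtb z y = false) : pvLtb z x = false := by
  rw [pv_ltb_iff] at h1
  rw [Bool.eq_false_iff, Ne, pv_ltb_iff] at h2 ⊢
  omega

-- insertBy with the lexicographic test preserves sortedness
theorem pv_insertBy_pairwise (x : Int × Int) (ys : List (Int × Int))
    (h : ys.Pairwise (fun a b => pvLtb b a = false)) :
    (PySem.List.insertBy pvLtb x ys).Pairwise (fun a b => pvLtb b a = false) := by
  induction ys with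
  | nil => simp [PySem.List.insertBy.eq_1]
  | cons y t ih =>
    rw [PySem.List.insertBy.eq_2]
    rw [List.pairwise_cons] at h
    obtain ⟨hy, ht⟩ := h
    by_cases hb : pvLtb x y = true
    · simp only [hb, if_true]
      refine List.Pairwise.cons ?_ ((List.pairwise_cons).mpr ⟨hy, ht⟩)
      intro z hz
      rcases List.mem_cons.mp hz with rfl | hz
      · exact pv_ltb_asymm hb
      · exact pv_ltb_shift hb (hy z hz)
    · rw [if_neg hb]
      refine List.Pairwise.cons ?_ (ih ht)
      intro z hz
      rcases (PySem.List.mem_insertBy pvLtb x z t).mp hz with rfl | hz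
      · simpa using hb
      · exact hy z hz

-- the whole insertion sort is sorted
theorem pv_foldl_insertBy_pairwise (xs acc : List (Int × Int))
    (h : acc.Pairwise (fun a b => pvLtb b a = false)) :
    (xs.foldl (fun acc x => PySem.List.insertBy pvLtb x acc) acc).Pairwise
      (fun a b => pvLtb b a = false) := by
  induction xs generalizing acc with
  | nil => exact h
  | cons x t ih => exact ih _ (pv_insertBy_pairwise x acc h)

-- on a sorted list, the adjacent-duplicate count plus the number of distinct values is the length
theorem pv_adj_sorted (s : List (Int × Int))
    (h : s.Pairwise (fun a b => pvLtb b a = false)) :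
    (s.zip (s.drop 1)).countP (fun q => decide (q.1 = q.2)) + s.dedup.length = s.length := by
  induction s with
  | nil => simp
  | cons a t ih =>
    rcases t with _ | ⟨b, t⟩
    · simp
    rw [List.pairwise_cons] at h
    obtain ⟨ha, hbt⟩ := h
    have ih' := ih hbt
    simp only [List.drop_succ_cons, List.drop_zero, List.zip_cons_cons, List.countP_cons, List.length_cons] at ih' ⊢
    by_cases hab : a = b
    · have hmem : a ∈ b :: t := by simp [hab]
      rw [List.dedup_cons_of_mem hmem]
      have he : (if decide (a = b) = true then 1 else 0) = 1 := by simp [hab]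
      rw [he]
      omega
    · have hmem : a ∉ b :: t := by
        intro hmem
        rcases List.mem_cons.mp hmem with heq | hmem
        · exact hab heq
        · rw [List.pairwise_cons] at hbt
          exact hab (pv_ltb_antisymm (hbt.1 a hmem) (ha b (by simp)))
      rw [List.dedup_cons_of_notMem hmem]
      have he : (if decide (a = b) = true then 1 else 0) = 0 := by simp [hab]
      rw [he, List.length_cons]
      omega

-- |set(xs)| = |dedup xs|
theorem pv_setofList_length (xs : List (Int × Int)) :
    (PySem.Set.ofList xs).length = xs.dedup.length := by
  have hperm : (PySem.Set.ofList xs).Perm xs.dedup := by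
    rw [List.perm_ext_iff_of_nodup (PySem.Set.nodup_ofList xs) xs.nodup_dedup]
    intro a
    rw [PySem.Set.mem_ofList, List.mem_dedup]
  exact hperm.length_eq

-- B's segment-building loop produces the canonical pairs of all consecutive pairs
theorem pv_segs_eq (vs : List (List Int)) (acc : List (Int × Int)) :
    vs.foldl (fun segs path =>
      (path.zip (path.drop 1)).foldl (fun (segs : List (Int × Int)) p =>
        segs ++ [pvCanon p]) segs) acc
    = acc ++ (vs.flatMap (fun l => l.zip (l.drop 1))).map pvCanon := by
  induction vs generalizing acc with
  | nil => simp
  | cons l t ih =>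
    simp only [List.foldl_cons, List.flatMap_cons, List.map_append]
    rw [PySem.List.foldl_append_singleton_eq_map]
    rw [ih]
    simp [List.append_assoc]

-- the B-side value in closed form
theorem pv_B_closed (d : List (Int × List Int)) :
    count_overlap_alt d =
      (((PySem.Dict.ofList d).values.flatMap (fun l => l.zip (l.drop 1))).length : Int)
        - (PySem.Set.ofList
            (((PySem.Dict.ofList d).values.flatMap (fun l => l.zip (l.drop 1))).map pvCanon)).length := by
  unfold count_overlap_alt
  rw [show (fun (segs : List (Int × Int)) (p : Int × Int) =>
        segs ++ [if p.1 ≤ p.2 then (p.1, p.2) else (p.2, p.1)])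
      = (fun (segs : List (Int × Int)) p => segs ++ [pvCanon p]) from rfl]
  rw [pv_segs_eq]
  simp only [List.nil_append]
  set ys := ((PySem.Dict.ofList d).values.flatMap (fun l => l.zip (l.drop 1))).map pvCanon with hys
  have hsorted2 : PySem.List.sorted2 ys (·.1) (·.2)
      = ys.foldl (fun acc x => PySem.List.insertBy pvLtb x acc) [] := rfl
  rw [hsorted2]
  set s := ys.foldl (fun acc x => PySem.List.insertBy pvLtb x acc) [] with hs
  have hperm : s.Perm ys := by
    have := PySem.List.foldl_insertBy_perm pvLtb ys []
    simpa using this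
  have hpw : s.Pairwise (fun a b => pvLtb b a = false) :=
    pv_foldl_insertBy_pairwise ys [] (by simp)
  rw [PySem.List.foldl_ite_add_one]
  have hadj := pv_adj_sorted s hpw
  have hlen : s.length = ys.length := hperm.length_eq
  have hded : s.dedup.length = ys.dedup.length := hperm.dedup.length_eq
  rw [pv_setofList_length]
  rw [show ((PySem.Dict.ofList d).values.flatMap (fun l => l.zip (l.drop 1))).length
      = ys.length from by rw [hys, List.length_map]]
  omega

-- ===== VERDICT (by name: the statement is the Claim_ definition above) =====
theorem count_overlap_spec : Claim_equal_count_overlap := by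
  intro d _
  unfold Spec_count_overlap
  rw [pv_A_closed, pv_B_closed]
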